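-- pv_equiv track=rewrite | github.com/jmstf94/Courses | Introduction to Computational Thinking and Data Science_edx/Midterm/problem4.py | solve
-- ===== SOURCE A (Python) =====
-- def eq(x1,x2,x3,x4):
--     return 25*x1+10*x2+5*x3+x4
--
-- def solve(s):
--     """
--     s: positive integer, what the sum should add up to
--     Solves the following optimization problem:
--         x1 + x2 + x3 + x4 is minimized
--         subject to the constraint x1*25 + x2*10 + x3*5 + x4 = s
--         and that x1, x2, x3, x4 are non-negative integers.
--     Returns a list of the coefficients x1, x2, x3, x4 in that order
--     """
--     x = 0
--     x1, x2, x3, x4 = (0,0,0,0)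
--     while (not eq(x1,x2,x3,x4)==s):
--         x+=1
--         for x1 in range(0,x+1):
--             for x2 in range(0,x+1):
--                 for x3 in range(0,x+1):
--                     for x4 in range(0,x+1):
--                         if eq(x1,x2,x3,x4)==s:
--                             return [x1,x2,x3,x4]
-- ===== SOURCE B (Python) =====
-- def solve(s):
--     """
--     s: positive integer, what the sum should add up to
--     Returns [x1,x2,x3,x4] with 25*x1+10*x2+5*x3+x4 == s: the lexicographically
--     smallest such tuple among those minimizing max(x1,x2,x3,x4).
--     Binary-search the minimal bound m, then build the tuple greedily.
--     """
--     def rep51(r, m):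
--         # exists x3,x4 in [0,m] with 5*x3 + x4 == r
--         return 0 <= r <= 6 * m and r - 5 * min(m, r // 5) <= m
--
--     def feasible(m):
--         return any(rep51(s - 25 * a - 10 * b, m)
--                    for a in range(m + 1) for b in range(m + 1))
--
--     lo, hi = 0, s            # feasible(s) holds (0,0,0,s); feasible(0) fails for s >= 1
--     while hi - lo > 1:
--         mid = (lo + hi) // 2
--         if feasible(mid):
--             hi = mid
--         else:
--             lo = mid
--     m = hi
--     x1 = next(a for a in range(m + 1)
--               if any(rep51(s - 25 * a - 10 * b, m) for b in range(m + 1)))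
--     r1 = s - 25 * x1
--     x2 = next(b for b in range(m + 1) if rep51(r1 - 10 * b, m))
--     r2 = r1 - 10 * x2
--     x3 = next(c for c in range(m + 1) if 0 <= r2 - 5 * c <= m)
--     return [x1, x2, x3, r2 - 5 * x3]
-- ===== Notes on version B (the rewrite author's own statement) =====
-- stated objective: faster
-- what changed: Replaced the growing quadruple brute-force sweep by a binary search for the minimal coefficient bound m (feasibility is monotone and checked in O(m^2) with a closed form for the 5/1 part), followed by a direct greedy construction of the lexicographically smallest feasible tuple.
-- outside the precondition, e.g. on solve(0): A returns None, B returns [0, 0, 0, 0]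
import Mathlib
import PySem

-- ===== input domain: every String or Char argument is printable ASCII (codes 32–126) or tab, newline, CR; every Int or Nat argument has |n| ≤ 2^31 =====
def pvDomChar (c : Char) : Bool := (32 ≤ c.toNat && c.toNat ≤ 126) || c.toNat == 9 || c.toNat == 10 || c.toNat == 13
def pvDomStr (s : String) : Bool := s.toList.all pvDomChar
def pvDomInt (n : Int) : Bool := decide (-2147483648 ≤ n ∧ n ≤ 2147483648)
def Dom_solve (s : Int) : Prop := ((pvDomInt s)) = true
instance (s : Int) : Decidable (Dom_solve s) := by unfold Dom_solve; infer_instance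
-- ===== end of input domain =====

-- B replaces A's growing quadruple brute-force sweep by a binary search for the minimal
-- coefficient bound plus a direct greedy construction of the lex-smallest tuple (faster).

-- ===== PORT A =====
-- Python helper eq(x1,x2,x3,x4)
def pyEq (x1 x2 x3 x4 : Int) : Int := 25*x1 + 10*x2 + 5*x3 + x4

-- one pass of the four nested 'for' loops with the early 'return' (first match in loop order)
def sweep (x s : Int) : Option (List Int) :=
  (PySem.List.pyRange 0 (x+1) 1).findSome? (fun x1 =>
    (PySem.List.pyRange 0 (x+1) 1).findSome? (fun x2 =>
      (PySem.List.pyRange 0 (x+1) 1).findSome? (fun x3 =>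
        (PySem.List.pyRange 0 (x+1) 1).findSome? (fun x4 =>
          if pyEq x1 x2 x3 x4 == s then some [x1, x2, x3, x4] else none))))

-- the 'while' loop; t is the current (x1,x2,x3,x4) tuple tested by the while condition.
-- Python returns None when the while condition fails (only reachable for s = 0, outside
-- Pre_); the port returns [] there and when fuel runs out (never inside Pre_).
def solveLoop (s : Int) : Int × Int × Int × Int → Int → Nat → List Int
  | _, _, 0 => []
  | t, x, fuel+1 =>
    if pyEq t.1 t.2.1 t.2.2.1 t.2.2.2 == s then []
    else
      match sweep (x+1) s with
      | some r => r
      | none => solveLoop s (x+1, x+1, x+1, x+1) (x+1) fuel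

def solve (s : Int) : List Int := solveLoop s (0, 0, 0, 0) 0 (s.toNat + 1)

-- ===== PORT B =====
-- rep51 r m: exists x3,x4 in [0,m] with 5*x3 + x4 == r (closed form from Source B)
def rep51 (r m : Int) : Bool :=
  decide (0 ≤ r) && decide (r ≤ 6*m) && decide (r - 5 * min m (PySem.Int.floordiv r 5) ≤ m)

def feasibleB (s m : Int) : Bool :=
  (PySem.List.pyRange 0 (m+1) 1).any (fun a =>
    (PySem.List.pyRange 0 (m+1) 1).any (fun b => rep51 (s - 25*a - 10*b) m))

-- the binary-search while loop of Source B
def bsearch (s : Int) : Int → Int → Nat → Int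
  | _, hi, 0 => hi
  | lo, hi, fuel+1 =>
    if hi - lo > 1 then
      let mid := PySem.Int.floordiv (lo + hi) 2
      if feasibleB s mid then bsearch s lo mid fuel else bsearch s mid hi fuel
    else hi

-- greedy lex-smallest construction given the bound m (the 'next(...)' chain of Source B;
-- Python's next would raise on an infeasible m, which never happens inside Pre_: the
-- port returns the default 0 there)
def solveBody (s m : Int) : List Int :=
  let x1 := ((PySem.List.pyRange 0 (m+1) 1).find? (fun a =>
      (PySem.List.pyRange 0 (m+1) 1).any (fun b => rep51 (s - 25*a - 10*b) m))).getD 0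
  let r1 := s - 25*x1
  let x2 := ((PySem.List.pyRange 0 (m+1) 1).find? (fun b => rep51 (r1 - 10*b) m)).getD 0
  let r2 := r1 - 10*x2
  let x3 := ((PySem.List.pyRange 0 (m+1) 1).find? (fun c =>
      decide (0 ≤ r2 - 5*c) && decide (r2 - 5*c ≤ m))).getD 0
  [x1, x2, x3, r2 - 5*x3]

def solve_alt (s : Int) : List Int :=
  solveBody s (bsearch s 0 s (s.toNat + 1))

-- ===== PRECONDITION & SPEC =====
-- Pre_ excludes s = 0, where A's while condition is immediately false and A returns None
-- (not a list), and s < 0, where A's while loop never terminates.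
def Pre_solve (s : Int) : Prop := 1 ≤ s
instance (s : Int) : Decidable (Pre_solve s) := by unfold Pre_solve; infer_instance
def pvWitness_solve : Int := (37)

def Spec_solve (s : Int) (out : List Int) : Prop := out = solve_alt s
instance (s : Int) (out : List Int) : Decidable (Spec_solve s out) := by unfold Spec_solve; infer_instance

-- ===== CLAIM (what is proved, stated in full; the proofs are below) =====
def Claim_equal_solve : Prop := ∀ (s : Int), Dom_solve s → Pre_solve s → Spec_solve s (solve s)


-- ===== LEMMAS AND PROOFS =====

-- the feasibility predicate both sides decide: a representation with all coefficients ≤ m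
def Feas (s m : Int) : Prop :=
  ∃ a b c d : Int, 0 ≤ a ∧ a ≤ m ∧ 0 ≤ b ∧ b ≤ m ∧ 0 ≤ c ∧ c ≤ m ∧ 0 ≤ d ∧ d ≤ m ∧
    25*a + 10*b + 5*c + d = s

-- proof-side names for the two inner levels of sweep (definitionally sweep's body)
def inner2 (s m a b : Int) : Option (List Int) :=
  (PySem.List.pyRange 0 (m+1) 1).findSome? (fun x3 =>
    (PySem.List.pyRange 0 (m+1) 1).findSome? (fun x4 =>
      if pyEq a b x3 x4 == s then some [a, b, x3, x4] else none))

def inner1 (s m a : Int) : Option (List Int) :=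
  (PySem.List.pyRange 0 (m+1) 1).findSome? (fun x2 => inner2 s m a x2)

theorem sweep_eq_inner (s m : Int) :
    sweep m s = (PySem.List.pyRange 0 (m+1) 1).findSome? (fun x1 => inner1 s m x1) := rfl

-- generic list lemmas
theorem findSome?_congr' {α β : Type} {l : List α} {f g : α → Option β}
    (h : ∀ x ∈ l, f x = g x) : l.findSome? f = l.findSome? g := by
  induction l with
  | nil => rfl
  | cons a t ih =>
    simp only [List.findSome?_cons, h a (by simp)]
    cases g a with
    | some b => rfl
    | none => exact ih (fun x hx => h x (by simp [hx]))

theorem find?_congr' {α : Type} {l : List α} {p q : α → Bool}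
    (h : ∀ x ∈ l, p x = q x) : l.find? p = l.find? q := by
  induction l with
  | nil => rfl
  | cons a t ih =>
    simp only [List.find?_cons, h a (by simp)]
    cases q a <;> simp_all [List.find?_cons]

theorem findSome?_guard {α β : Type} (l : List α) (p : α → Bool) (f : α → β) :
    l.findSome? (fun y => if p y then some (f y) else none) = (l.find? p).map f := by
  induction l with
  | nil => rfl
  | cons a t ih =>
    by_cases h : p a = true
    · simp [List.findSome?_cons, List.find?_cons, h]
    · simp [List.findSome?_cons, List.find?_cons, h, ih]

theorem find?_beq_int (l : List Int) (r : Int) :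
    l.find? (fun y => y == r) = if r ∈ l then some r else none := by
  induction l with
  | nil => rfl
  | cons a t ih =>
    by_cases h : a = r
    · subst h; simp [List.find?_cons]
    · simp [List.find?_cons, h, ih, Ne.symm h]

theorem findSome?_bind_find? {α β : Type} (l : List α) (g : α → Option β) :
    l.findSome? g = (l.find? (fun a => (g a).isSome)).bind g := by
  induction l with
  | nil => rfl
  | cons a t ih =>
    by_cases h : (g a).isSome
    · obtain ⟨b, hb⟩ := Option.isSome_iff_exists.mp h
      simp [List.findSome?_cons, List.find?_cons, h, hb]
    · simp only [Option.not_isSome_iff_eq_none] at h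
      simp [List.findSome?_cons, List.find?_cons, h, ih]

theorem isSome_findSome?' {α β : Type} (l : List α) (g : α → Option β) :
    (l.findSome? g).isSome = l.any (fun a => (g a).isSome) := by
  induction l with
  | nil => rfl
  | cons a t ih =>
    simp only [List.findSome?_cons, List.any_cons]
    cases hg : g a <;> simp [hg, ih]

-- closed form rep51 = existence of x3 with both residues in range
theorem rep51_iff (r m : Int) (hm : 0 ≤ m) :
    rep51 r m = true ↔ ∃ c : Int, 0 ≤ c ∧ c ≤ m ∧ 0 ≤ r - 5*c ∧ r - 5*c ≤ m := by
  unfold rep51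
  rw [PySem.Int.floordiv_eq_ediv_of_pos (by norm_num)]
  simp only [Bool.and_eq_true, decide_eq_true_eq]
  constructor
  · rintro ⟨⟨h0, h6⟩, hmin⟩
    refine ⟨min m (r / 5), ?_, min_le_left _ _, ?_, hmin⟩
    · rcases le_total m (r / 5) with h | h
      · rw [min_eq_left h]; omega
      · rw [min_eq_right h]; omega
    · rcases le_total m (r / 5) with h | h
      · rw [min_eq_left h]; omega
      · rw [min_eq_right h]; omega
  · rintro ⟨c, hc0, hcm, h0, hm'⟩
    have hc5 : c ≤ r / 5 := by omega
    refine ⟨⟨by omega, by omega⟩, ?_⟩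
    rcases le_total m (r / 5) with h | h
    · rw [min_eq_left h]; omega
    · rw [min_eq_right h]; omega

theorem feasibleB_iff (s m : Int) (hm : 0 ≤ m) : feasibleB s m = true ↔ Feas s m := by
  unfold feasibleB Feas
  simp only [List.any_eq_true, PySem.List.mem_pyRange_one]
  constructor
  · rintro ⟨a, ⟨ha0, ha1⟩, b, ⟨hb0, hb1⟩, hr⟩
    obtain ⟨c, hc0, hcm, hd0, hdm⟩ := (rep51_iff _ m hm).mp hr
    exact ⟨a, b, c, s - 25*a - 10*b - 5*c, by omega, by omega, by omega, by omega,
      hc0, hcm, by omega, by omega, by omega⟩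
  · rintro ⟨a, b, c, d, ha0, ham, hb0, hbm, hc0, hcm, hd0, hdm, he⟩
    exact ⟨a, ⟨ha0, by omega⟩, b, ⟨hb0, by omega⟩,
      (rep51_iff _ m hm).mpr ⟨c, hc0, hcm, by omega, by omega⟩⟩

theorem Feas_mono {s m m' : Int} (h : Feas s m) (hmm : m ≤ m') : Feas s m' := by
  obtain ⟨a, b, c, d, h1, h2, h3, h4, h5, h6, h7, h8, h9⟩ := h
  exact ⟨a, b, c, d, h1, by omega, h3, by omega, h5, by omega, h7, by omega, h9⟩

-- ===== sweep structure =====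

theorem inner3_eq (s m a b c : Int) :
    (PySem.List.pyRange 0 (m+1) 1).findSome? (fun x4 =>
        if pyEq a b c x4 == s then some [a, b, c, x4] else none)
    = if (0 ≤ s - 25*a - 10*b - 5*c ∧ s - 25*a - 10*b - 5*c ≤ m)
      then some [a, b, c, s - 25*a - 10*b - 5*c] else none := by
  set r := s - 25*a - 10*b - 5*c with hr
  have hcong : (PySem.List.pyRange 0 (m+1) 1).findSome? (fun x4 =>
      if pyEq a b c x4 == s then some [a, b, c, x4] else none)
      = (PySem.List.pyRange 0 (m+1) 1).findSome? (fun x4 =>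
      if x4 == r then some [a, b, c, x4] else none) := by
    refine findSome?_congr' (fun d _ => ?_)
    by_cases h : d = r
    · subst h
      have h1 : pyEq a b c r = s := by unfold pyEq; omega
      simp [h1]
    · have h1 : pyEq a b c d ≠ s := by unfold pyEq; omega
      rw [if_neg (by simpa using h1), if_neg (by simpa using h)]
  rw [hcong, findSome?_guard _ (fun y => y == r) (fun y => [a, b, c, y]), find?_beq_int]
  by_cases h : (0:Int) ≤ r ∧ r < m + 1
  · rw [if_pos (PySem.List.mem_pyRange_one.mpr h), Option.map_some, if_pos (by omega)]
  · rw [if_neg (fun hc => h (PySem.List.mem_pyRange_one.mp hc)), Option.map_none,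
      if_neg (by omega)]

theorem inner2_eq (s m a b : Int) :
    inner2 s m a b
    = ((PySem.List.pyRange 0 (m+1) 1).find? (fun c =>
        decide (0 ≤ s - 25*a - 10*b - 5*c) && decide (s - 25*a - 10*b - 5*c ≤ m))).map
        (fun c => [a, b, c, s - 25*a - 10*b - 5*c]) := by
  unfold inner2
  have hcong : ∀ c ∈ PySem.List.pyRange 0 (m+1) 1,
      (PySem.List.pyRange 0 (m+1) 1).findSome? (fun x4 =>
        if pyEq a b c x4 == s then some [a, b, c, x4] else none)
      = if (decide (0 ≤ s - 25*a - 10*b - 5*c) && decide (s - 25*a - 10*b - 5*c ≤ m))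
          then some [a, b, c, s - 25*a - 10*b - 5*c] else none := by
    intro c _
    rw [inner3_eq]
    by_cases h : 0 ≤ s - 25*a - 10*b - 5*c ∧ s - 25*a - 10*b - 5*c ≤ m
    · rw [if_pos h, if_pos (by simp only [Bool.and_eq_true, decide_eq_true_eq]; omega)]
    · rw [if_neg h, if_neg (by simp only [Bool.and_eq_true, decide_eq_true_eq]; exact h)]
  rw [findSome?_congr' hcong, findSome?_guard]

theorem isSome_inner2 (s m a b : Int) (hm : 0 ≤ m) :
    (inner2 s m a b).isSome = rep51 (s - 25*a - 10*b) m := by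
  rw [inner2_eq, Option.isSome_map, Bool.eq_iff_iff, List.find?_isSome,
    rep51_iff _ m hm]
  constructor
  · rintro ⟨c, hcmem, hc⟩
    rw [PySem.List.mem_pyRange_one] at hcmem
    simp only [Bool.and_eq_true, decide_eq_true_eq] at hc
    exact ⟨c, by omega, by omega, by omega, by omega⟩
  · rintro ⟨c, hc0, hcm, h0, hm'⟩
    refine ⟨c, PySem.List.mem_pyRange_one.mpr ⟨hc0, by omega⟩, by simp; omega⟩

theorem isSome_inner1 (s m a : Int) (hm : 0 ≤ m) :
    (inner1 s m a).isSome
    = (PySem.List.pyRange 0 (m+1) 1).any (fun b => rep51 (s - 25*a - 10*b) m) := by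
  unfold inner1
  rw [isSome_findSome?']
  exact PySem.List.any_congr_mem (fun b _ => isSome_inner2 s m a b hm)

theorem sweep_none (s m : Int) (hm : 0 ≤ m) (h : feasibleB s m = false) :
    sweep m s = none := by
  have hiso : (sweep m s).isSome = feasibleB s m := by
    rw [sweep_eq_inner, isSome_findSome?',
      PySem.List.any_congr_mem (fun a _ => isSome_inner1 s m a hm)]
    rfl
  rw [← Option.not_isSome_iff_eq_none, hiso, h]
  simp

theorem sweep_feas (s m : Int) (hm : 0 ≤ m) (h : feasibleB s m = true) :
    sweep m s = some (solveBody s m) := by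
  -- level 1: first a making the rest feasible
  have h1iso : ∀ a ∈ PySem.List.pyRange 0 (m+1) 1, (inner1 s m a).isSome
      = (fun a => (PySem.List.pyRange 0 (m+1) 1).any fun b => rep51 (s - 25*a - 10*b) m) a :=
    fun a _ => isSome_inner1 s m a hm
  have hany1 : ((PySem.List.pyRange 0 (m+1) 1).find? (fun a =>
      (PySem.List.pyRange 0 (m+1) 1).any fun b => rep51 (s - 25*a - 10*b) m)).isSome := by
    rw [List.find?_isSome]
    unfold feasibleB at h
    rw [List.any_eq_true] at h
    obtain ⟨a, ha, hpa⟩ := h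
    exact ⟨a, ha, hpa⟩
  obtain ⟨x1, hx1⟩ := Option.isSome_iff_exists.mp hany1
  have hp1 := List.find?_some hx1
  -- level 2: first b
  have hany2 : ((PySem.List.pyRange 0 (m+1) 1).find? (fun b => rep51 (s - 25*x1 - 10*b) m)).isSome := by
    rw [List.find?_isSome]
    simp only [List.any_eq_true] at hp1
    exact hp1
  obtain ⟨x2, hx2⟩ := Option.isSome_iff_exists.mp hany2
  have hp2 : rep51 (s - 25*x1 - 10*x2) m = true := by have := List.find?_some hx2; simpa using this
  -- level 3: first c
  have hany3 : ((PySem.List.pyRange 0 (m+1) 1).find? (fun c =>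
      decide (0 ≤ s - 25*x1 - 10*x2 - 5*c) && decide (s - 25*x1 - 10*x2 - 5*c ≤ m))).isSome := by
    rw [List.find?_isSome]
    obtain ⟨c, hc0, hcm, hd0, hdm⟩ := (rep51_iff _ m hm).mp hp2
    exact ⟨c, PySem.List.mem_pyRange_one.mpr ⟨hc0, by omega⟩, by simp; omega⟩
  obtain ⟨x3, hx3⟩ := Option.isSome_iff_exists.mp hany3
  -- assemble A's side
  rw [sweep_eq_inner, findSome?_bind_find?,
    find?_congr' (q := fun a => (PySem.List.pyRange 0 (m+1) 1).any
      fun b => rep51 (s - 25*a - 10*b) m) h1iso, hx1, Option.bind_some]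
  unfold inner1
  rw [findSome?_bind_find?,
    find?_congr' (q := fun b => rep51 (s - 25*x1 - 10*b) m)
      (fun b _ => isSome_inner2 s m x1 b hm), hx2, Option.bind_some,
    inner2_eq, hx3, Option.map_some]
  -- assemble B's side
  simp only [solveBody, hx1, Option.getD_some, hx2, hx3]

-- ===== the two top-level loops =====

theorem loop_eq (s M : Int) (hM1 : 1 ≤ M) (hMfeas : feasibleB s M = true)
    (hMmin : ∀ y, 0 ≤ y → y < M → feasibleB s y = false) :
    ∀ (fuel : Nat) (x : Int), 0 ≤ x → x < M → M ≤ x + fuel →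
      solveLoop s (x, x, x, x) x fuel = solveBody s M := by
  intro fuel
  induction fuel with
  | zero => intro x _ h1 h2; omega
  | succ fuel ih =>
    intro x hx0 hxM hfuel
    have hguard : ¬ ((pyEq x x x x == s) = true) := by
      simp only [beq_iff_eq]
      intro hcontra
      have : Feas s x := ⟨x, x, x, x, hx0, le_refl x, hx0, le_refl x, hx0, le_refl x,
        hx0, le_refl x, by unfold pyEq at hcontra; omega⟩
      have := (feasibleB_iff s x hx0).mpr this
      rw [hMmin x hx0 hxM] at this
      exact absurd this (by simp)
    rw [solveLoop, if_neg hguard]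
    by_cases hstep : x + 1 = M
    · rw [hstep, sweep_feas s M (by omega) hMfeas]
    · have hlt : x + 1 < M := by omega
      rw [sweep_none s (x+1) (by omega) (hMmin (x+1) (by omega) hlt)]
      exact ih (x+1) (by omega) hlt (by push_cast at hfuel ⊢; omega)

theorem bsearch_eq (s M : Int) (hMfeas : feasibleB s M = true)
    (hMmin : ∀ y, 0 ≤ y → y < M → feasibleB s y = false) (hM0 : 0 ≤ M) :
    ∀ (fuel : Nat) (lo hi : Int), 0 ≤ lo → lo < hi →
      feasibleB s lo = false → feasibleB s hi = true → hi - lo ≤ 1 + fuel →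
      bsearch s lo hi fuel = M := by
  have hle : ∀ lo hi : Int, 0 ≤ lo → lo < hi → feasibleB s lo = false →
      feasibleB s hi = true → hi - lo ≤ 1 → hi = M := by
    intro lo hi hlo0 hlh hflo hfhi hgap
    have hMhi : M ≤ hi := by
      by_contra hcon
      push_neg at hcon
      rw [hMmin hi (by omega) hcon] at hfhi
      exact absurd hfhi (by simp)
    have hloM : lo < M := by
      by_contra hcon
      push_neg at hcon
      have : Feas s lo := Feas_mono ((feasibleB_iff s M hM0).mp hMfeas) hcon
      rw [(feasibleB_iff s lo hlo0).mpr this] at hflo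
      exact absurd hflo (by simp)
    omega
  intro fuel
  induction fuel with
  | zero =>
    intro lo hi hlo0 hlh hflo hfhi hfuel
    exact hle lo hi hlo0 hlh hflo hfhi (by omega)
  | succ fuel ih =>
    intro lo hi hlo0 hlh hflo hfhi hfuel
    rw [bsearch]
    by_cases hgap : hi - lo > 1
    · rw [if_pos hgap]
      have hmid : PySem.Int.floordiv (lo + hi) 2 = (lo + hi) / 2 :=
        PySem.Int.floordiv_eq_ediv_of_pos (by norm_num)
      have hb1 : lo < (lo + hi) / 2 := by omega
      have hb2 : (lo + hi) / 2 < hi := by omega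
      show (if feasibleB s (PySem.Int.floordiv (lo + hi) 2) = true
        then bsearch s lo (PySem.Int.floordiv (lo + hi) 2) fuel
        else bsearch s (PySem.Int.floordiv (lo + hi) 2) hi fuel) = M
      rw [hmid]
      by_cases hfm : feasibleB s ((lo + hi) / 2) = true
      · rw [if_pos hfm]
        exact ih lo _ hlo0 hb1 hflo hfm (by push_cast at hfuel ⊢; omega)
      · rw [if_neg hfm]
        exact ih _ hi (by omega) hb2 (by rwa [Bool.not_eq_true] at hfm) hfhi
          (by push_cast at hfuel ⊢; omega)
    · rw [if_neg hgap]
      exact hle lo hi hlo0 hlh hflo hfhi (by omega)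

-- ===== VERDICT (by name: the statement is the Claim_ definition above) =====
theorem solve_spec : Claim_equal_solve := by
  intro s _ hs
  unfold Spec_solve
  have hs1 : (1:Int) ≤ s := hs
  have hfs : feasibleB s s = true := (feasibleB_iff s s (by omega)).mpr
    ⟨0, 0, 0, s, by omega, by omega, by omega, by omega, by omega, by omega, by omega,
      by omega, by omega⟩
  -- the minimal feasible bound
  have hex : ∃ n : Nat, feasibleB s (n : Int) = true :=
    ⟨s.toNat, by rwa [Int.toNat_of_nonneg (by omega)]⟩
  set N := Nat.find hex with hN
  set M : Int := (N : Int) with hMdef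
  have hMfeas : feasibleB s M = true := Nat.find_spec hex
  have hMmin : ∀ y : Int, 0 ≤ y → y < M → feasibleB s y = false := by
    intro y hy0 hyM
    have hynat : y.toNat < N := by omega
    have := Nat.find_min hex hynat
    rw [show ((y.toNat : Nat) : Int) = y from by omega] at this
    rwa [Bool.not_eq_true] at this
  have hM1 : 1 ≤ M := by
    by_contra hcon
    push_neg at hcon
    have hM0' : M = 0 := by
      have : (0:Int) ≤ M := by simp [hMdef]
      omega
    have : Feas s 0 := (feasibleB_iff s 0 (by omega)).mp (by rwa [hM0'] at hMfeas)
    obtain ⟨a, b, c, d, h⟩ := this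
    omega
  have hMs : M ≤ s := by
    by_contra hcon
    push_neg at hcon
    rw [hMmin s (by omega) hcon] at hfs
    exact absurd hfs (by simp)
  have hA : solve s = solveBody s M := by
    unfold solve
    exact loop_eq s M hM1 hMfeas hMmin (s.toNat + 1) 0 (by omega) (by omega)
      (by push_cast; omega)
  have hB : solve_alt s = solveBody s M := by
    unfold solve_alt
    rw [bsearch_eq s M hMfeas hMmin (by omega) (s.toNat + 1) 0 s (by omega) (by omega)
      (hMmin 0 (by omega) (by omega)) hfs (by push_cast; omega)]
  rw [hA, hB]
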